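-- pv_equiv track=rewrite | github.com/ImranZafar28/CodeSignal-Arcade-Intro | Land of Logic/longestWord.py | solution
-- ===== SOURCE A (Python) =====
-- def solution(text):
--     import string
--     lowercase = string.ascii_lowercase
--     uppercase = string.ascii_uppercase
--     word = ''
--     longest = ''
--     for i in text:
--         if i in lowercase or i in uppercase:
--             word += i
--             if len(word) == len(text):
--                 return word
--             elif len(word) > len(longest):
--                 longest = word
--         else:
--             if len(word) > len(longest):
--                 longest = word
--             word = ''
--     return longest
-- ===== SOURCE B (Python) =====
-- def solution(text):
--     # boundary-index algorithm: record the positions of all non-letter characters,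
--     # then pick the widest gap between consecutive boundaries and slice it out
--     breaks = [-1]
--     for i, ch in enumerate(text):
--         if not ('a' <= ch <= 'z' or 'A' <= ch <= 'Z'):
--             breaks.append(i)
--     breaks.append(len(text))
--     best_l, best_r = -1, 0
--     for l, r in zip(breaks, breaks[1:]):
--         if r - l - 1 > best_r - best_l - 1:
--             best_l, best_r = l, r
--     return text[best_l + 1:best_r]
-- ===== Notes on version B (the rewrite author's own statement) =====
-- stated objective: faster
-- what changed: Instead of accumulating candidate word strings character by character and re-copying the growing run into `longest` at every letter, B never builds any intermediate word: it records the integer positions of the non-letter boundaries, selects the widest gap between consecutive boundaries, and extracts the answer with a single slice at the end.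
import Mathlib
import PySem

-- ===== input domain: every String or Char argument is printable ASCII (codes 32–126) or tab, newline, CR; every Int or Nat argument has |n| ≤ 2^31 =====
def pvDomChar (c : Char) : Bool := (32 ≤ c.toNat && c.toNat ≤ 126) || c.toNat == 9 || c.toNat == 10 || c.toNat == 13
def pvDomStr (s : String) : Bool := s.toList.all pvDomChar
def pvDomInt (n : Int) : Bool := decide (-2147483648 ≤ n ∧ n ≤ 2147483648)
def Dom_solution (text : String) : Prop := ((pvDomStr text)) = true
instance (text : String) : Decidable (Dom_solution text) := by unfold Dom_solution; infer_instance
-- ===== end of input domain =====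

-- B replaces A's word-accumulating scan (which re-copies the growing run into
-- `longest` at every letter) by a boundary-index algorithm: record the positions
-- of the non-letter characters, pick the widest gap between consecutive
-- boundaries, and slice the answer out of the text once at the end.

-- `i in string.ascii_lowercase or i in string.ascii_uppercase` (exact on ASCII)
def isAsciiLetter (c : Char) : Bool := ('a' ≤ c && c ≤ 'z') || ('A' ≤ c && c ≤ 'Z')

-- ===== PORT A =====
-- A's for-loop over text with `word`/`longest` accumulators and the early
-- `return word` when len(word) == len(text).
def loopA (n : Nat) : List Char → List Char → List Char → List Char
  | [], _word, longest => longest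
  | c :: cs, word, longest =>
    if isAsciiLetter c then
      let w := word ++ [c]
      if w.length = n then w
      else loopA n cs w (if w.length > longest.length then w else longest)
    else
      loopA n cs [] (if word.length > longest.length then word else longest)

def solution (text : String) : String :=
  String.mk (loopA text.toList.length text.toList [] [])

-- ===== PORT B =====
-- Source B: breaks = [-1] + positions of non-letters + [len(text)];
-- fold over zip(breaks, breaks[1:]) keeping the first widest gap (best_l, best_r);
-- return text[best_l+1 : best_r].
def solution_alt (text : String) : String :=
  let cs := text.toList
  let breaks : List Int :=
    ((PySem.List.enumerate cs 0).foldl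
      (fun acc p => if !(isAsciiLetter p.2) then acc ++ [p.1] else acc) [(-1 : Int)])
    ++ [(cs.length : Int)]
  let best := (breaks.zip breaks.tail).foldl
      (fun (b : Int × Int) (p : Int × Int) =>
        if p.2 - p.1 - 1 > b.2 - b.1 - 1 then p else b)
      ((-1 : Int), (0 : Int))
  String.mk (PySem.List.slice cs (some (best.1 + 1)) (some best.2))

-- ===== PRECONDITION & SPEC =====
def Spec_solution (text : String) (out : String) : Prop := out = solution_alt text
instance (text : String) (out : String) : Decidable (Spec_solution text out) := by unfold Spec_solution; infer_instance

-- ===== CLAIM (what is proved, stated in full; the proofs are below) =====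
def Claim_equal_solution : Prop := ∀ (text : String), Dom_solution text → Spec_solution text (solution text)

-- ===== LEMMAS AND PROOFS =====

-- max-of-two-by-length step (strict >, so the first longest wins), shared spec
def pick (b x : List Char) : List Char := if x.length > b.length then x else b

-- Source B's best-pair chooser
def bestf (b p : Int × Int) : Int × Int := if p.2 - p.1 - 1 > b.2 - b.1 - 1 then p else b

-- A's loop without the early return
def loopB : List Char → List Char → List Char → List Char
  | [], _word, longest => longest
  | c :: cs, word, longest =>
    if isAsciiLetter c then loopB cs (word ++ [c]) (pick longest (word ++ [c]))
    else loopB cs [] (pick longest word)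

-- maximal letter runs (dropping empties), and all segments (keeping empties)
def altRuns : List Char → List Char → List (List Char)
  | [], cur => if cur = [] then [] else [cur]
  | c :: cs, cur =>
    if isAsciiLetter c then altRuns cs (cur ++ [c])
    else (if cur = [] then [] else [cur]) ++ altRuns cs []

def segsAll : List Char → List Char → List (List Char)
  | [], cur => [cur]
  | c :: cs, cur =>
    if isAsciiLetter c then segsAll cs (cur ++ [c]) else cur :: segsAll cs []

-- consecutive break pairs, generated directly from the text
def pairsOf (l k : Int) : List Char → List (Int × Int)
  | [] => [(l, k)]
  | c :: cs => if isAsciiLetter c then pairsOf l (k + 1) cs else (l, k) :: pairsOf k (k + 1) cs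

def consecPairs : List Int → List (Int × Int)
  | [] => []
  | [_] => []
  | a :: b :: t => (a, b) :: consecPairs (b :: t)

theorem consecPairs_cons₂ (a b : Int) (t : List Int) :
    consecPairs (a :: b :: t) = (a, b) :: consecPairs (b :: t) := rfl

-- ---------- A-side: loopA = loopB = foldl pick over altRuns ----------

theorem altRuns_head (cs : List Char) : ∀ (w : List Char), w ≠ [] →
    ∃ t rest, altRuns cs w = (w ++ t) :: rest := by
  induction cs with
  | nil => intro w hw; exact ⟨[], [], by simp [altRuns, hw]⟩
  | cons c cs ih =>
    intro w hw
    by_cases hc : isAsciiLetter c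
    · obtain ⟨t, rest, h⟩ := ih (w ++ [c]) (by simp)
      exact ⟨[c] ++ t, rest, by simp [altRuns, hc, h]⟩
    · exact ⟨[], altRuns cs [], by simp [altRuns, hc, hw]⟩

theorem altRuns_foldl_init (cs w longest : List Char) (hw : w ≠ [])
    (hlen : w.length ≤ longest.length + 1) :
    (altRuns cs w).foldl pick longest = (altRuns cs w).foldl pick (pick longest w) := by
  obtain ⟨t, rest, h⟩ := altRuns_head cs w hw
  rw [h]
  simp only [List.foldl]
  congr 1
  by_cases hgt : w.length > longest.length
  · have h1 : pick longest w = w := by simp [pick, hgt]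
    have h2 : pick longest (w ++ t) = w ++ t := by
      simp only [pick, List.length_append]; rw [if_pos (by omega)]
    have h3 : pick w (w ++ t) = w ++ t := by
      cases t with
      | nil => simp [pick]
      | cons a t => simp only [pick, List.length_append, List.length_cons]
                    rw [if_pos (by omega)]
    rw [h1, h2, h3]
  · have h1 : pick longest w = longest := by simp [pick, hgt]
    rw [h1]

theorem loopB_eq_runs (cs : List Char) : ∀ (word longest : List Char),
    word.length ≤ longest.length →
    loopB cs word longest = (altRuns cs word).foldl pick longest := by
  induction cs with
  | nil =>
    intro word longest h
    by_cases hword : word = []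
    · subst hword; simp [loopB, altRuns]
    · have hpick : pick longest word = longest := by
        simp only [pick]; rw [if_neg]; omega
      simp [loopB, altRuns, hword, hpick]
  | cons c cs ih =>
    intro word longest h
    by_cases hc : isAsciiLetter c
    · have hle : (word ++ [c]).length ≤ (pick longest (word ++ [c])).length := by
        simp only [pick]; split <;> omega
      calc loopB (c :: cs) word longest
          = loopB cs (word ++ [c]) (pick longest (word ++ [c])) := by simp [loopB, hc, pick]
        _ = (altRuns cs (word ++ [c])).foldl pick (pick longest (word ++ [c])) := ih _ _ hle
        _ = (altRuns cs (word ++ [c])).foldl pick longest :=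
            (altRuns_foldl_init cs (word ++ [c]) longest (by simp) (by simp; omega)).symm
        _ = (altRuns (c :: cs) word).foldl pick longest := by simp [altRuns, hc]
    · have h0 : ([] : List Char).length ≤ (pick longest word).length := by simp
      calc loopB (c :: cs) word longest
          = loopB cs [] (pick longest word) := by simp [loopB, hc, pick]
        _ = (altRuns cs []).foldl pick (pick longest word) := ih _ _ h0
        _ = (altRuns (c :: cs) word).foldl pick longest := by
            by_cases hword : word = []
            · subst hword; simp [altRuns, hc, pick]
            · simp [altRuns, hc, hword, List.foldl_cons]

theorem loopA_eq_loopB (cs : List Char) : ∀ (word longest : List Char) (n : Nat),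
    word.length + cs.length ≤ n → longest.length + cs.length ≤ n →
    loopA n cs word longest = loopB cs word longest := by
  induction cs with
  | nil => intro word longest n _ _; rfl
  | cons c cs ih =>
    intro word longest n hw hl
    simp only [List.length_cons] at hw hl
    by_cases hc : isAsciiLetter c
    · by_cases hn : (word ++ [c]).length = n
      · have hcs : cs = [] := by
          simp only [List.length_append, List.length_cons, List.length_nil] at hn
          exact List.length_eq_zero_iff.mp (by omega)
        subst hcs
        have hp : pick longest (word ++ [c]) = word ++ [c] := by
          simp only [pick, List.length_append, List.length_cons, List.length_nil]
          rw [if_pos (by simp only [List.length_append, List.length_cons,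
            List.length_nil] at hn; omega)]
        simp [loopA, loopB, hc, hn, hp]
      · have hn' : ¬(word.length + 1 = n) := by
          simp only [List.length_append, List.length_cons, List.length_nil] at hn; omega
        calc loopA n (c :: cs) word longest
            = loopA n cs (word ++ [c]) (pick longest (word ++ [c])) := by
              simp [loopA, hc, hn', pick]
          _ = loopB cs (word ++ [c]) (pick longest (word ++ [c])) :=
              ih _ _ n (by first | omega | (simp; omega))
                (by simp only [pick]; split <;> (first | omega | (simp; omega)))
          _ = loopB (c :: cs) word longest := by simp [loopB, hc, pick]
    · calc loopA n (c :: cs) word longest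
          = loopA n cs [] (pick longest word) := by simp [loopA, hc, pick]
        _ = loopB cs [] (pick longest word) :=
            ih _ _ n (by simp; omega) (by simp only [pick]; split <;> omega)
        _ = loopB (c :: cs) word longest := by simp [loopB, hc, pick]

-- ---------- B-side: breaks/zip/fold/slice = foldl pick over segments ----------

-- zip L L.tail lists the consecutive pairs of L
theorem zip_tail_eq_consecPairs : ∀ (L : List Int), L.zip L.tail = consecPairs L := by
  intro L
  induction L with
  | nil => rfl
  | cons a t ih =>
    cases t with
    | nil => rfl
    | cons b t' => simp only [List.tail_cons, List.zip_cons_cons, consecPairs]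
                   rw [← ih]; rfl

-- the break list built from enumerate/filter yields exactly pairsOf
theorem consec_breaks : ∀ (cs : List Char) (l k : Int),
    consecPairs (l :: (((PySem.List.enumerate cs k).filter
        (fun q => !(isAsciiLetter q.2))).map (·.1) ++ [k + cs.length]))
      = pairsOf l k cs := by
  intro cs
  induction cs with
  | nil => intro l k; simp [PySem.List.enumerate, consecPairs, pairsOf]
  | cons c cs ih =>
    intro l k
    rw [PySem.List.enumerate_cons]
    by_cases hc : isAsciiLetter c
    · have : k + ((c :: cs).length : Int) = (k + 1) + (cs.length : Int) := by
        simp; ring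
      simp only [List.filter_cons, hc, Bool.not_true, this]
      simpa [pairsOf, hc] using ih l (k + 1)
    · have : k + ((c :: cs).length : Int) = (k + 1) + (cs.length : Int) := by
        simp; ring
      rw [List.filter_cons, if_pos (by simp [hc]), this,
        List.map_cons, List.cons_append, consecPairs_cons₂, ih k (k + 1)]
      simp [pairsOf, hc]

-- bounds of every consecutive-break pair
theorem pairsOf_bounds : ∀ (cs : List Char) (l k : Int), -1 ≤ l → l < k →
    ∀ p ∈ pairsOf l k cs, -1 ≤ p.1 ∧ p.1 < p.2 ∧ p.2 ≤ k + cs.length := by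
  intro cs
  induction cs with
  | nil =>
    intro l k h1 h2 p hp
    simp only [pairsOf, List.mem_singleton] at hp
    subst hp
    exact ⟨h1, h2, by simp⟩
  | cons c cs ih =>
    intro l k h1 h2 p hp
    by_cases hc : isAsciiLetter c
    · rw [pairsOf, if_pos hc] at hp
      have := ih l (k + 1) h1 (by omega) p hp
      simp only [List.length_cons]
      push_cast
      push_cast at this
      omega
    · rw [pairsOf, if_neg hc] at hp
      simp only [List.mem_cons] at hp
      rcases hp with hp | hp
      · subst hp
        refine ⟨h1, h2, ?_⟩
        simp only [List.length_cons]
        push_cast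
        omega
      · have := ih k (k + 1) (by omega) (by omega) p hp
        simp only [List.length_cons]
        push_cast
        push_cast at this
        omega

-- drop/take form of the slice a pair denotes
def segOf (full : List Char) (p : Int × Int) : List Char :=
  (full.drop (p.1 + 1).toNat).take (p.2.toNat - (p.1 + 1).toNat)

theorem segOf_length (full : List Char) (p : Int × Int)
    (h1 : -1 ≤ p.1) (h2 : p.1 < p.2) (h3 : p.2 ≤ (full.length : Int)) :
    ((segOf full p).length : Int) = p.2 - p.1 - 1 := by
  simp only [segOf, List.length_take, List.length_drop]
  omega

-- the pairs map under segOf to exactly the segments of the text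
theorem pairs_map_seg : ∀ (cs pre : List Char) (j : Nat), j ≤ pre.length →
    (pairsOf ((j : Int) - 1) (pre.length : Int) cs).map (segOf (pre ++ cs))
      = segsAll cs (pre.drop j) := by
  intro cs
  induction cs with
  | nil =>
    intro pre j hj
    simp only [pairsOf, List.map_cons, List.map_nil, segsAll, List.append_nil]
    congr 1
    simp only [segOf]
    have h1 : ((j : Int) - 1 + 1).toNat = j := by omega
    have h2 : ((pre.length : Int)).toNat = pre.length := by omega
    rw [h1, h2, List.take_of_length_le (by simp)]
  | cons c cs ih =>
    intro pre j hj
    by_cases hc : isAsciiLetter c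
    · rw [pairsOf, if_pos hc]
      have hlen : (pre.length : Int) + 1 = ((pre ++ [c]).length : Int) := by
        simp
      have hdrop : (pre ++ [c]).drop j = pre.drop j ++ [c] :=
        List.drop_append_of_le_length hj
      have happ : pre ++ [c] ++ cs = pre ++ c :: cs := by simp
      have hih := ih (pre ++ [c]) j (by omega)
      rw [happ] at hih
      rw [hlen, segsAll, if_pos hc, ← hdrop, ← hih]
    · rw [pairsOf, if_neg hc]
      rw [segsAll, if_neg hc]
      simp only [List.map_cons]
      congr 1
      · -- head segment is exactly pre.drop j
        simp only [segOf]
        have h1 : ((j : Int) - 1 + 1).toNat = j := by omega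
        have h2 : ((pre.length : Int)).toNat = pre.length := by omega
        rw [h1, h2, List.drop_append_of_le_length hj,
          List.take_append_of_le_length (by simp),
          List.take_of_length_le (by simp)]
      · -- tail: recurse with pre' = pre ++ [c], j' = pre'.length
        have happ : pre ++ [c] ++ cs = pre ++ c :: cs := by simp
        have hih := ih (pre ++ [c]) (pre ++ [c]).length (le_refl _)
        have h1 : ((pre ++ [c]).length : Int) - 1 = (pre.length : Int) := by simp
        have h2 : ((pre ++ [c]).length : Int) = (pre.length : Int) + 1 := by simp
        rw [h1, h2, happ] at hih
        rw [hih]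
        simp

-- the best-pair fold commutes with segOf
theorem fold_commute (full : List Char) : ∀ (P : List (Int × Int)) (b : Int × Int),
    (∀ p ∈ P, ((segOf full p).length : Int) = p.2 - p.1 - 1) →
    ((segOf full b).length : Int) = b.2 - b.1 - 1 →
    segOf full (P.foldl bestf b) = (P.map (segOf full)).foldl pick (segOf full b) := by
  intro P
  induction P with
  | nil => intro b _ _; rfl
  | cons p P ih =>
    intro b hP hb
    have hp := hP p (by simp)
    have hcond : (p.2 - p.1 - 1 > b.2 - b.1 - 1) ↔
        ((segOf full p).length > (segOf full b).length) := by
      rw [← hp, ← hb]; exact_mod_cast Iff.rfl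
    simp only [List.foldl_cons, List.map_cons, bestf, pick]
    by_cases h : p.2 - p.1 - 1 > b.2 - b.1 - 1
    · rw [if_pos h, if_pos (hcond.mp h)]
      exact ih p (fun q hq => hP q (by simp [hq])) hp
    · rw [if_neg h, if_neg (fun hg => h (hcond.mpr hg))]
      exact ih b (fun q hq => hP q (by simp [hq])) hb

-- the fold's result keeps nonnegative endpoints
theorem fold_nonneg : ∀ (P : List (Int × Int)) (b : Int × Int),
    (∀ p ∈ P, 0 ≤ p.1 + 1 ∧ 0 ≤ p.2) → 0 ≤ b.1 + 1 ∧ 0 ≤ b.2 →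
    0 ≤ (P.foldl bestf b).1 + 1 ∧ 0 ≤ (P.foldl bestf b).2 := by
  intro P
  induction P with
  | nil => intro b _ hb; exact hb
  | cons p P ih =>
    intro b hP hb
    simp only [List.foldl_cons, bestf]
    split
    · exact ih p (fun q hq => hP q (by simp [hq])) (hP p (by simp))
    · exact ih b (fun q hq => hP q (by simp [hq])) hb

-- folding pick over all segments equals folding it over the nonempty runs
theorem foldl_pick_segs_eq_altRuns : ∀ (cs cur b : List Char),
    (segsAll cs cur).foldl pick b = (altRuns cs cur).foldl pick b := by
  intro cs
  induction cs with
  | nil =>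
    intro cur b
    by_cases hcur : cur = []
    · subst hcur; simp [segsAll, altRuns, pick]
    · simp [segsAll, altRuns, hcur]
  | cons c cs ih =>
    intro cur b
    by_cases hc : isAsciiLetter c
    · rw [segsAll, if_pos hc, altRuns, if_pos hc]; exact ih _ _
    · rw [segsAll, if_neg hc, altRuns, if_neg hc]
      by_cases hcur : cur = []
      · subst hcur
        simp only [List.foldl_cons]
        have : pick b [] = b := by simp [pick]
        rw [this]; exact ih _ _
      · simp only [if_neg hcur, List.cons_append, List.nil_append, List.foldl_cons]
        exact ih _ _

-- ===== VERDICT (by name: the statement is the Claim_ definition above) =====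
theorem solution_spec : Claim_equal_solution := by
  intro text _
  unfold Spec_solution solution solution_alt
  set cs := text.toList
  -- A side
  rw [loopA_eq_loopB cs [] [] cs.length (by simp) (by simp),
    loopB_eq_runs cs [] [] (le_refl _)]
  -- B side: normalise the break list
  simp only []
  rw [PySem.List.foldl_append_if (fun (q : Int × Char) => !(isAsciiLetter q.2))
    (fun (q : Int × Char) => q.1)]
  have hbreaks : ([(-1 : Int)] ++ ((PySem.List.enumerate cs 0).filter
        (fun q => !(isAsciiLetter q.2))).map (·.1)) ++ [(cs.length : Int)]
      = (-1 : Int) :: (((PySem.List.enumerate cs 0).filter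
        (fun q => !(isAsciiLetter q.2))).map (·.1) ++ [(0 : Int) + cs.length]) := by
    simp
  rw [hbreaks, zip_tail_eq_consecPairs, consec_breaks cs (-1) 0]
  set P := pairsOf (-1) 0 cs with hPdef
  have hbounds := pairsOf_bounds cs (-1) 0 (by norm_num) (by norm_num)
  have hlens : ∀ p ∈ P, ((segOf cs p).length : Int) = p.2 - p.1 - 1 := by
    intro p hp
    obtain ⟨h1, h2, h3⟩ := hbounds p hp
    exact segOf_length cs p h1 h2 (by simpa using h3)
  have hinit : ((segOf cs ((-1 : Int), (0 : Int))).length : Int) = 0 - (-1) - 1 := by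
    simp [segOf]
  have hnn := fold_nonneg P ((-1 : Int), (0 : Int))
    (fun p hp => by obtain ⟨h1, h2, _⟩ := hbounds p hp; constructor <;> omega)
    (by norm_num)
  -- turn the final slice into segOf
  have hslice : PySem.List.slice cs (some ((P.foldl bestf ((-1 : Int), (0 : Int))).1 + 1))
      (some (P.foldl bestf ((-1 : Int), (0 : Int))).2)
      = segOf cs (P.foldl bestf ((-1 : Int), (0 : Int))) := by
    rw [PySem.List.slice_toNat cs hnn.1 hnn.2]; rfl
  have hmap : P.map (segOf cs) = segsAll cs [] := by
    simpa using pairs_map_seg cs [] 0 (by simp)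
  have hfold := fold_commute cs P ((-1 : Int), (0 : Int)) hlens hinit
  have hbestf : (fun (b : Int × Int) (p : Int × Int) =>
      if p.2 - p.1 - 1 > b.2 - b.1 - 1 then p else b) = bestf := by
    funext b p; rfl
  have hpick : (fun (b x : List Char) => if x.length > b.length then x else b) = pick := by
    funext b x; rfl
  rw [hbestf, hslice, hfold, hmap]
  have hseginit : segOf cs ((-1 : Int), (0 : Int)) = [] := by simp [segOf]
  rw [hseginit, foldl_pick_segs_eq_altRuns]
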